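-- pv_equiv track=rewrite | github.com/HyunjunGil/PIU-StepMaker | utils.py | get_note_range
-- ===== SOURCE A (Python) =====
-- from typing import List, Tuple, Dict
--
-- def get_note_range(step_data: List[List[int]], ln: int, col: int) -> Tuple[int, int]:
--     if step_data[ln][col] == 0:
--         return ln, ln
--     elif step_data[ln][col] == 1:
--         return ln, ln
--     elif step_data[ln][col] == 2:
--         ln_to = ln
--         while ln_to + 1 < len(step_data) and (
--             (step_data[ln_to][col] == 2 and step_data[ln_to + 1][col] == 3)
--             or (step_data[ln_to][col] == 3 and step_data[ln_to + 1][col] in [3, 4])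
--         ):
--             ln_to += 1
--         return ln, ln_to
--     elif step_data[ln][col] == 3:
--         ln_from = ln
--         while ln_from - 1 < len(step_data) and (
--             (step_data[ln_from][col] == 4 and step_data[ln_from - 1][col] == 3)
--             or (step_data[ln_from][col] == 3 and step_data[ln_from - 1][col] in [2, 3])
--         ):
--             ln_from -= 1
--         ln_to = ln
--         while ln_to + 1 < len(step_data) and (
--             (step_data[ln_to][col] == 2 and step_data[ln_to + 1][col] == 3)
--             or (step_data[ln_to][col] == 3 and step_data[ln_to + 1][col] in [3, 4])
--         ):
--             ln_to += 1
--         return ln_from, ln_to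
--     elif step_data[ln][col] == 4:
--         ln_from = ln
--         while ln_from - 1 < len(step_data) and (
--             (step_data[ln_from][col] == 4 and step_data[ln_from - 1][col] == 3)
--             or (step_data[ln_from][col] == 3 and step_data[ln_from - 1][col] in [2, 3])
--         ):
--             ln_from -= 1
--         return ln_from, ln
-- ===== SOURCE B (Python) =====
-- def _leading(bs):
--     n = 0
--     for b in bs:
--         if not b:
--             break
--         n += 1
--     return n
--
--
-- def get_note_range(step_data, ln, col):
--     v = step_data[ln][col]
--     if v in (2, 3, 4):
--         vals = [row[col] for row in step_data]
--         links = [a == 2 and b == 3 or (a == 3 and b in (3, 4))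
--                  for a, b in zip(vals, vals[1:])]
--         lo = ln if v == 2 else ln - _leading(links[:ln][::-1])
--         hi = ln if v == 4 else ln + _leading(links[ln:])
--         return lo, hi
--     return ln, ln
-- ===== Notes on version B (the rewrite author's own statement) =====
-- stated objective: alternative
-- what changed: B drops A's 5-way value branch with duplicated index-walking while loops: it extracts the column once, precomputes the boolean table of hold-links between consecutive rows, and obtains ln_from/ln_to by counting the leading-true run of that table below and above ln.
-- intended difference: On hold cells (value 3/4) whose link chain reaches row 0 and links from the last row back into row 0, A's buggy guard `ln_from - 1 < len(step_data)` lets the backward scan wrap into Python negative indices and return a negative ln_from, while B stops at row 0, the intended top boundary of the hold. — e.g. on get_note_range([[3], [2], [3]], 0, 0): A returns (-2, 0), B returns (0, 0)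
-- outside the precondition, e.g. on get_note_range([[5]], 0, 0): A returns None, B returns (0, 0); on get_note_range([[2], [0], []], 0, 0): A returns (0, 0), B raises IndexError; on get_note_range([[0], [3], [3]], -1, 0): A returns (-2, -1), B returns (-1, 0)
import Mathlib
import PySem

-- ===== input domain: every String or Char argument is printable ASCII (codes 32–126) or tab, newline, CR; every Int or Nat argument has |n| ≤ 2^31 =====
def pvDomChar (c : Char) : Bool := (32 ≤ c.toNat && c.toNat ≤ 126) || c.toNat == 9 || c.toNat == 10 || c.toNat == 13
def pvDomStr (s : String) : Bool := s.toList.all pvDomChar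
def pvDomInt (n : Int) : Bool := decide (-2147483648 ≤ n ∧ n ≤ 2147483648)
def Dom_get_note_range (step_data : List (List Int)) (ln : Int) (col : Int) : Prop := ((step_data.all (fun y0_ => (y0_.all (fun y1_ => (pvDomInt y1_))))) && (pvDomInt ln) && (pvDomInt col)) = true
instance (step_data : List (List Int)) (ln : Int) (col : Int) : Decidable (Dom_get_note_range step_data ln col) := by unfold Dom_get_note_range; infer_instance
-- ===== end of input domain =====

-- B replaces A's 5-way branch with duplicated index-walking while loops by extracting the
-- column once, precomputing the table of hold-links between consecutive rows, and counting
-- leading-true runs of that table around ln; on charts where the hold chain wraps through row 0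
-- (Python negative indexing, D_ below) B intentionally stops at row 0 instead. Objective: alternative.


-- step_data[i][col] with Python indexing (negative indices wrap; none = IndexError)
def pvCell (sd : List (List Int)) (i col : Int) : Option Int :=
  (PySem.List.pyGet? sd i).bind (fun row => PySem.List.pyGet? row col)

-- the hold-link relation between two consecutive cells (Source B's comprehension body;
-- also the shape of A's loop conditions, proved below)
def pvLink (a b : Option Int) : Bool :=
  (a == some 2 && b == some 3) || (a == some 3 && (b == some 3 || b == some 4))

-- ===== PORT A =====
-- A's backward while loop, verbatim condition (incl. the `ln_from - 1 < len(step_data)` guard);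
-- fuel bounds the recursion; inside Pre_ the loop stops before the fuel runs out
def pvBwdA (sd : List (List Int)) (col : Int) (lf : Int) : Nat → Int
  | 0 => lf
  | f + 1 =>
    if decide (lf - 1 < (sd.length : Int)) &&
        ((pvCell sd lf col == some 4 && pvCell sd (lf - 1) col == some 3) ||
         (pvCell sd lf col == some 3 &&
           (pvCell sd (lf - 1) col == some 2 || pvCell sd (lf - 1) col == some 3)))
    then pvBwdA sd col (lf - 1) f else lf

-- A's forward while loop
def pvFwdA (sd : List (List Int)) (col : Int) (lt : Int) : Nat → Int
  | 0 => lt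
  | f + 1 =>
    if decide (lt + 1 < (sd.length : Int)) &&
        ((pvCell sd lt col == some 2 && pvCell sd (lt + 1) col == some 3) ||
         (pvCell sd lt col == some 3 &&
           (pvCell sd (lt + 1) col == some 3 || pvCell sd (lt + 1) col == some 4)))
    then pvFwdA sd col (lt + 1) f else lt

def get_note_range (step_data : List (List Int)) (ln : Int) (col : Int) : Int × Int :=
  let v := pvCell step_data ln col
  if v == some 0 then (ln, ln)
  else if v == some 1 then (ln, ln)
  else if v == some 2 then (ln, pvFwdA step_data col ln (2 * step_data.length + 1))
  else if v == some 3 then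
    (pvBwdA step_data col ln (2 * step_data.length + 1), pvFwdA step_data col ln (2 * step_data.length + 1))
  else if v == some 4 then (pvBwdA step_data col ln (2 * step_data.length + 1), ln)
  else (ln, ln)   -- Python A returns None here; excluded by Pre_

-- ===== PORT B =====
-- Source B's `vals = [row[col] for row in step_data]` (Option: none = the read that raises, outside Pre_)
def pvVals (sd : List (List Int)) (col : Int) : List (Option Int) :=
  sd.map (fun row => PySem.List.pyGet? row col)

-- Source B's `links = [... for a, b in zip(vals, vals[1:])]`
def pvLinks (sd : List (List Int)) (col : Int) : List Bool :=
  ((pvVals sd col).zip ((pvVals sd col).drop 1)).map (fun ab => pvLink ab.1 ab.2)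

-- Source B's `_leading`: number of leading True entries
def pvLeading : List Bool → Nat
  | [] => 0
  | b :: bs => if b then pvLeading bs + 1 else 0

def get_note_range_alt (step_data : List (List Int)) (ln : Int) (col : Int) : Int × Int :=
  let v := pvCell step_data ln col
  if v == some 2 || v == some 3 || v == some 4 then
    let links := pvLinks step_data col
    let lo := if v == some 2 then ln
              else ln - (pvLeading ((PySem.List.slice links none (some ln)).reverse) : Int)
    let hi := if v == some 4 then ln
              else ln + (pvLeading (PySem.List.slice links (some ln) none) : Int)
    (lo, hi)
  else (ln, ln)

-- ===== PRECONDITION & SPEC =====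
-- condition-side readers (same meaning as Python's step_data[i][col] and the link relation,
-- defined independently of both ports so that Pre_/D_ mention only the input)
def pvCellC (sd : List (List Int)) (i col : Int) : Option Int :=
  if 0 ≤ i ∧ i < (sd.length : Int) then PySem.List.pyGet? (sd.getD i.toNat []) col
  else if -(sd.length : Int) ≤ i ∧ i < 0 then PySem.List.pyGet? (sd.getD (i + sd.length).toNat []) col
  else none

def pvLinkC (a b : Option Int) : Bool :=
  decide ((a = some 2 ∧ b = some 3) ∨ (a = some 3 ∧ (b = some 3 ∨ b = some 4)))

-- Pre_ keeps the natural domain: the start cell holds a step value 0..4 (otherwise A returns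
-- None, not an int pair), for scan values 2/3/4 it requires 0 <= ln < len and col readable in
-- every row (on ragged charts B's column extraction raises while A may stop scanning first, and
-- on negative ln, outside a chart's natural row numbering, A mixes wrapped and unwrapped row
-- indices while B slices, so the two often agree by accident but can differ — see cites),
-- and it excludes the charts whose wrapped hold chain runs all the way past row -len, where A
-- raises IndexError.
def Pre_get_note_range (step_data : List (List Int)) (ln : Int) (col : Int) : Prop :=
  (pvCellC step_data ln col = some 0 ∨ pvCellC step_data ln col = some 1 ∨
   pvCellC step_data ln col = some 2 ∨ pvCellC step_data ln col = some 3 ∨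
   pvCellC step_data ln col = some 4) ∧
  ((pvCellC step_data ln col = some 2 ∨ pvCellC step_data ln col = some 3 ∨
    pvCellC step_data ln col = some 4) →
     0 ≤ ln ∧ ln < (step_data.length : Int) ∧
     ∀ row ∈ step_data, -(row.length : Int) ≤ col ∧ col < (row.length : Int)) ∧
  ((pvCellC step_data ln col = some 3 ∨ pvCellC step_data ln col = some 4) →
     ¬ (∀ i : Nat, i < (ln + step_data.length).toNat →
          pvLinkC (pvCellC step_data (ln - i - 1) col) (pvCellC step_data (ln - i) col) = true))

instance (step_data : List (List Int)) (ln : Int) (col : Int) : Decidable (Pre_get_note_range step_data ln col) := by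
  unfold Pre_get_note_range; infer_instance

def pvWitness_get_note_range : List (List Int) × Int × Int := ([[2], [3], [0]], 0, 0)

-- row i (a plain Nat index) read at col, Python row[col] semantics
def pvRowAt (sd : List (List Int)) (i : Nat) (col : Int) : Option Int :=
  PySem.List.pyGet? (sd.getD i []) col

-- A's buggy backward guard (`ln_from - 1 < len` instead of `ln_from - 1 >= 0`) lets the hold
-- chain wrap through Python negative indices: on hold cells (value 3/4) whose link chain runs
-- down to row 0 and links from the last row into row 0, A returns a NEGATIVE ln_from while B
-- stops at the chart top, the intended boundary of the hold.
def D_get_note_range (step_data : List (List Int)) (ln : Int) (col : Int) : Prop :=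
  (pvRowAt step_data ln.toNat col = some 3 ∨ pvRowAt step_data ln.toNat col = some 4) ∧
  0 ≤ ln ∧ ln < (step_data.length : Int) ∧
  (∀ i : Nat, i < ln.toNat →
     pvLinkC (pvRowAt step_data i col) (pvRowAt step_data (i + 1) col) = true) ∧
  pvLinkC (pvRowAt step_data (step_data.length - 1) col) (pvRowAt step_data 0 col) = true

instance (step_data : List (List Int)) (ln : Int) (col : Int) : Decidable (D_get_note_range step_data ln col) := by
  unfold D_get_note_range; infer_instance

def Spec_get_note_range (step_data : List (List Int)) (ln : Int) (col : Int) (out : Int × Int) : Prop := ¬ D_get_note_range step_data ln col → out = get_note_range_alt step_data ln col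
instance (step_data : List (List Int)) (ln : Int) (col : Int) (out : Int × Int) : Decidable (Spec_get_note_range step_data ln col out) := by unfold Spec_get_note_range; infer_instance

def pvDiffWitness_get_note_range : List (List Int) × Int × Int := ([[3], [2], [3]], 0, 0)
def pvDiffWitnessOut_get_note_range : (Int × Int) × (Int × Int) := ((-2, 0), (0, 0))

-- ===== CLAIM (what is proved, stated in full; the proofs are below) =====
def Claim_unchanged_get_note_range : Prop := ∀ (step_data : List (List Int)) (ln : Int) (col : Int), Dom_get_note_range step_data ln col → Pre_get_note_range step_data ln col → Spec_get_note_range step_data ln col (get_note_range step_data ln col)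
def Claim_changed_get_note_range : Prop := Dom_get_note_range (pvDiffWitness_get_note_range.1) (pvDiffWitness_get_note_range.2.1) (pvDiffWitness_get_note_range.2.2) ∧ Pre_get_note_range (pvDiffWitness_get_note_range.1) (pvDiffWitness_get_note_range.2.1) (pvDiffWitness_get_note_range.2.2) ∧ D_get_note_range (pvDiffWitness_get_note_range.1) (pvDiffWitness_get_note_range.2.1) (pvDiffWitness_get_note_range.2.2) ∧ get_note_range (pvDiffWitness_get_note_range.1) (pvDiffWitness_get_note_range.2.1) (pvDiffWitness_get_note_range.2.2) = pvDiffWitnessOut_get_note_range.1 ∧ get_note_range_alt (pvDiffWitness_get_note_range.1) (pvDiffWitness_get_note_range.2.1) (pvDiffWitness_get_note_range.2.2) = pvDiffWitnessOut_get_note_range.2 ∧ pvDiffWitnessOut_get_note_range.1 ≠ pvDiffWitnessOut_get_note_range.2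
def Claim_exact_get_note_range : Prop := ∀ (step_data : List (List Int)) (ln : Int) (col : Int), Dom_get_note_range step_data ln col → Pre_get_note_range step_data ln col → D_get_note_range step_data ln col → get_note_range step_data ln col ≠ get_note_range_alt step_data ln col

-- ===== LEMMAS AND PROOFS =====

theorem pvLinks_length (sd : List (List Int)) (col : Int) :
    (pvLinks sd col).length = sd.length - 1 := by
  simp [pvLinks, pvVals]

theorem pvCell_nat (sd : List (List Int)) (col : Int) (j : Nat) (h : j < sd.length) :
    pvCell sd (j : Int) col = PySem.List.pyGet? sd[j] col := by
  simp [pvCell, List.getElem?_eq_getElem, h]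

theorem pvLinks_getElem (sd : List (List Int)) (col : Int) (j : Nat)
    (h : j < (pvLinks sd col).length) :
    (pvLinks sd col)[j] = pvLink (pvCell sd (j : Int) col) (pvCell sd ((j : Int) + 1) col) := by
  have hlen := pvLinks_length sd col
  have hj1 : j + 1 < sd.length := by omega
  have h2 : ((j : Int) + 1) = ((j + 1 : Nat) : Int) := by push_cast; ring
  rw [h2, pvCell_nat sd col j (by omega), pvCell_nat sd col (j + 1) hj1]
  simp [pvLinks, pvVals, List.getElem_zip]

theorem pvCellC_eq (sd : List (List Int)) (i col : Int) : pvCellC sd i col = pvCell sd i col := by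
  unfold pvCellC pvCell
  split
  · next h =>
    have hi : i.toNat < sd.length := by omega
    have hg : PySem.List.pyGet? sd i = sd[i.toNat]? := PySem.List.pyGet?_of_nonneg (xs := sd) h.1
    rw [hg, List.getElem?_eq_getElem hi]
    simp [List.getD, List.getElem?_eq_getElem, hi]
  · next h =>
    split
    · next h2 =>
      have hlen : 0 < sd.length := by omega
      have hidx : (i + sd.length).toNat < sd.length := by omega
      have hi : i = -(((-i).toNat : Nat) : Int) := by omega
      have hk1 : 0 < (-i).toNat := by omega
      have hk2 : (-i).toNat ≤ sd.length := by omega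
      rw [hi, PySem.List.pyGet?_neg_natCast sd (-i).toNat hk1 hk2]
      have hidx2 : sd.length - (-i).toNat = (i + sd.length).toNat := by omega
      rw [hidx2, List.getElem?_eq_getElem hidx]
      have hi2 : (-(((-i).toNat : Nat) : Int) + sd.length).toNat = (i + sd.length).toNat := by omega
      rw [hi2]
      simp [List.getD, List.getElem?_eq_getElem, hidx]
    · next h2 =>
      rw [(PySem.List.pyGet?_eq_none_iff _ _).2 (by unfold PySem.Raise.InRange; push_cast; omega)]
      simp

theorem pvLinkC_eq (a b : Option Int) : pvLinkC a b = pvLink a b := by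
  simp only [pvLinkC, pvLink]
  rw [Bool.eq_iff_iff]
  simp

theorem pvRowAt_eq (sd : List (List Int)) (col : Int) (i : Nat) (h : i < sd.length) :
    pvRowAt sd i col = pvCell sd (i : Int) col := by
  unfold pvRowAt
  rw [pvCell_nat sd col i h]
  simp [List.getD, List.getElem?_eq_getElem, h]

theorem pvWrap_eq (sd : List (List Int)) (col : Int) (h : 0 < sd.length) :
    pvLinkC (pvRowAt sd (sd.length - 1) col) (pvRowAt sd 0 col) =
      pvLink (pvCell sd (-1) col) (pvCell sd 0 col) := by
  rw [pvLinkC_eq, pvRowAt_eq sd col (sd.length - 1) (by omega), pvRowAt_eq sd col 0 h,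
    Nat.cast_zero]
  have hneg : pvCell sd (-1) col = pvCell sd ((sd.length - 1 : Nat) : Int) col := by
    unfold pvCell
    have hg : PySem.List.pyGet? sd (-1) = PySem.List.pyGet? sd ((sd.length - 1 : Nat) : Int) := by
      rw [PySem.List.pyGet?_neg_one, PySem.List.pyGet?_natCast, List.getLast?_eq_getElem?]
    rw [hg]
  rw [hneg]

-- A's backward condition is pvLink with the arguments read the other way round
theorem pvBoolShuffle :
    ∀ p q r s : Bool, ((s && q) || (r && (p || q))) = ((p && r) || (q && (r || s))) := by decide

theorem pvLeading_le (bs : List Bool) : pvLeading bs ≤ bs.length := by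
  induction bs with
  | nil => simp [pvLeading]
  | cons b bs ih => by_cases h : b = true <;> simp [pvLeading, h] <;> omega

theorem pvBwdA_le (sd : List (List Int)) (col : Int) :
    ∀ (f : Nat) (x : Int), pvBwdA sd col x f ≤ x := by
  intro f
  induction f with
  | zero => intro x; exact le_refl x
  | succ f ih =>
    intro x
    show (if _ then pvBwdA sd col (x - 1) f else x) ≤ x
    split
    · exact le_trans (ih (x - 1)) (by omega)
    · exact le_refl x

-- forward loop = ln + leading-true count of the link table from ln on
theorem pvFwd_eq (sd : List (List Int)) (col : Int) :
    ∀ (f : Nat) (lt : Int), 0 ≤ lt → sd.length ≤ lt.toNat + f + 1 →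
      pvFwdA sd col lt f = lt + (pvLeading ((pvLinks sd col).drop lt.toNat) : Int) := by
  intro f
  induction f with
  | zero =>
    intro lt h0 hf
    have hnil : (pvLinks sd col).drop lt.toNat = [] :=
      List.drop_eq_nil_of_le (by rw [pvLinks_length]; omega)
    simp [pvFwdA, hnil, pvLeading]
  | succ f ih =>
    intro lt h0 hf
    obtain ⟨k, rfl⟩ : ∃ k : Nat, lt = (k : Int) := ⟨lt.toNat, (Int.toNat_of_nonneg h0).symm⟩
    simp only [Int.toNat_natCast] at hf ⊢
    show (if decide ((k : Int) + 1 < (sd.length : Int)) && _ then pvFwdA sd col ((k : Int) + 1) f else (k : Int)) = _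
    by_cases hend : sd.length ≤ k + 1
    · have hg : decide ((k : Int) + 1 < (sd.length : Int)) = false := by
        simp only [decide_eq_false_iff_not]; push_cast; omega
      have hnil : (pvLinks sd col).drop k = [] :=
        List.drop_eq_nil_of_le (by rw [pvLinks_length]; omega)
      rw [hg, Bool.false_and, if_neg (by simp), hnil]
      simp [pvLeading]
    · have hk : k < (pvLinks sd col).length := by rw [pvLinks_length]; omega
      have hg : decide ((k : Int) + 1 < (sd.length : Int)) = true := by
        simp only [decide_eq_true_eq]; push_cast; omega
      have hcons : (pvLinks sd col).drop k = (pvLinks sd col)[k] :: (pvLinks sd col).drop (k + 1) :=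
        List.drop_eq_getElem_cons hk
      have hshape : ((pvCell sd (k : Int) col == some 2 && pvCell sd ((k : Int) + 1) col == some 3) ||
             (pvCell sd (k : Int) col == some 3 &&
               (pvCell sd ((k : Int) + 1) col == some 3 || pvCell sd ((k : Int) + 1) col == some 4))) =
             pvLink (pvCell sd (k : Int) col) (pvCell sd ((k : Int) + 1) col) := rfl
      rw [hg, Bool.true_and, hcons, pvLinks_getElem sd col k hk, hshape]
      by_cases hc : pvLink (pvCell sd (k : Int) col) (pvCell sd ((k : Int) + 1) col) = true
      · rw [hc, if_pos rfl]
        have h2 : ((k : Int) + 1) = ((k + 1 : Nat) : Int) := by push_cast; ring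
        rw [h2, ih ((k + 1 : Nat) : Int) (by positivity) (by simp only [Int.toNat_natCast]; omega)]
        simp only [Int.toNat_natCast, pvLeading]
        push_cast; ring
      · have hc' : pvLink (pvCell sd (k : Int) col) (pvCell sd ((k : Int) + 1) col) = false := by
          revert hc; cases pvLink (pvCell sd (k : Int) col) (pvCell sd ((k : Int) + 1) col) <;> simp
        rw [hc', if_neg (by simp)]
        simp [pvLeading]

-- backward loop = ln - leading-true count of the reversed link table up to ln,
-- provided the chain does not wrap through row 0
theorem pvBwd_eq (sd : List (List Int)) (col : Int) :
    ∀ (f : Nat) (lf : Int), 0 ≤ lf → lf < (sd.length : Int) → lf.toNat < f →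
      (¬ ((∀ i : Nat, i < lf.toNat →
             pvLink (pvCell sd i col) (pvCell sd (i + 1) col) = true) ∧
          pvLink (pvCell sd (-1) col) (pvCell sd 0 col) = true)) →
      pvBwdA sd col lf f = lf - (pvLeading (((pvLinks sd col).take lf.toNat).reverse) : Int) := by
  intro f
  induction f with
  | zero => intro lf _ _ hfu _; omega
  | succ f ih =>
    intro lf h0 hn hfu hw
    obtain ⟨k, rfl⟩ : ∃ k : Nat, lf = (k : Int) := ⟨lf.toNat, (Int.toNat_of_nonneg h0).symm⟩
    simp only [Int.toNat_natCast] at hfu hw ⊢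
    show (if decide ((k : Int) - 1 < (sd.length : Int)) && _ then pvBwdA sd col ((k : Int) - 1) f else (k : Int)) = _
    have hg : decide ((k : Int) - 1 < (sd.length : Int)) = true := by
      simp only [decide_eq_true_eq]; omega
    have hshape : ((pvCell sd (k : Int) col == some 4 && pvCell sd ((k : Int) - 1) col == some 3) ||
           (pvCell sd (k : Int) col == some 3 &&
             (pvCell sd ((k : Int) - 1) col == some 2 || pvCell sd ((k : Int) - 1) col == some 3))) =
           pvLink (pvCell sd ((k : Int) - 1) col) (pvCell sd (k : Int) col) :=
      pvBoolShuffle (pvCell sd ((k : Int) - 1) col == some 2) (pvCell sd ((k : Int) - 1) col == some 3)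
        (pvCell sd (k : Int) col == some 3) (pvCell sd (k : Int) col == some 4)
    rw [hg, Bool.true_and, hshape]
    match k with
    | 0 =>
      have hwr : pvLink (pvCell sd (-1) col) (pvCell sd 0 col) = false := by
        rcases Bool.eq_false_or_eq_true (pvLink (pvCell sd (-1) col) (pvCell sd 0 col)) with h | h
        · exact absurd ⟨fun i hi => absurd hi (by omega), h⟩ hw
        · exact h
      rw [show ((0 : Nat) : Int) - 1 = (-1 : Int) from by norm_num,
          show ((0 : Nat) : Int) = (0 : Int) from by norm_num, hwr, if_neg (by simp)]
      simp [pvLeading]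
    | k + 1 =>
      have hkL : k < (pvLinks sd col).length := by
        rw [pvLinks_length]; push_cast at hn; omega
      have hm1 : ((k + 1 : Nat) : Int) - 1 = (k : Int) := by push_cast; ring
      have hp1 : ((k : Int) + 1) = ((k + 1 : Nat) : Int) := by push_cast; ring
      have hcond : pvLink (pvCell sd (((k + 1 : Nat) : Int) - 1) col) (pvCell sd ((k + 1 : Nat) : Int) col) =
          (pvLinks sd col)[k] := by
        rw [pvLinks_getElem sd col k hkL, hm1, hp1]
      have htake : ((pvLinks sd col).take (k + 1)).reverse =
          (pvLinks sd col)[k] :: ((pvLinks sd col).take k).reverse := by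
        rw [List.take_succ, List.getElem?_eq_getElem hkL]
        simp
      rw [hcond, htake]
      by_cases hc : (pvLinks sd col)[k] = true
      · rw [hc, if_pos rfl, hm1]
        have hw' : ¬ ((∀ i : Nat, i < k →
               pvLink (pvCell sd i col) (pvCell sd (i + 1) col) = true) ∧
            pvLink (pvCell sd (-1) col) (pvCell sd 0 col) = true) := by
          rintro ⟨hch, hwr⟩
          refine hw ⟨fun i hi => ?_, hwr⟩
          by_cases hik : i < k
          · exact hch i hik
          · have : i = k := by omega
            subst this
            rw [pvLinks_getElem sd col i hkL] at hc
            exact hc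
        have := ih (k : Int) (by positivity) (by push_cast at hn ⊢; omega)
          (by simp only [Int.toNat_natCast]; omega) (by simp only [Int.toNat_natCast]; exact hw')
        simp only [Int.toNat_natCast] at this
        rw [this, pvLeading]
        simp only [if_pos rfl]
        push_cast; ring
      · have hc' : (pvLinks sd col)[k] = false := by
          rcases Bool.eq_false_or_eq_true ((pvLinks sd col)[k]) with h | h
          · exact absurd h hc
          · exact h
        rw [hc', if_neg (by simp)]
        simp [pvLeading]

-- inside D_ the backward loop crosses row 0 and ends negative
theorem pvBwd_neg (sd : List (List Int)) (col : Int) (ln : Int)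
    (hchain : ∀ i : Nat, i < ln.toNat →
        pvLink (pvCell sd i col) (pvCell sd (i + 1) col) = true)
    (hwrap : pvLink (pvCell sd (-1) col) (pvCell sd 0 col) = true) :
    ∀ (f : Nat) (lf : Int), 0 ≤ lf → lf ≤ ln → lf < (sd.length : Int) → lf.toNat + 1 < f →
      pvBwdA sd col lf f < 0 := by
  intro f
  induction f with
  | zero => intro lf _ _ _ hfu; omega
  | succ f ih =>
    intro lf h0 hln hn hfu
    obtain ⟨k, rfl⟩ : ∃ k : Nat, lf = (k : Int) := ⟨lf.toNat, (Int.toNat_of_nonneg h0).symm⟩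
    simp only [Int.toNat_natCast] at hfu
    show (if decide ((k : Int) - 1 < (sd.length : Int)) && _ then pvBwdA sd col ((k : Int) - 1) f else (k : Int)) < 0
    have hg : decide ((k : Int) - 1 < (sd.length : Int)) = true := by
      simp only [decide_eq_true_eq]; omega
    have hshape : ((pvCell sd (k : Int) col == some 4 && pvCell sd ((k : Int) - 1) col == some 3) ||
           (pvCell sd (k : Int) col == some 3 &&
             (pvCell sd ((k : Int) - 1) col == some 2 || pvCell sd ((k : Int) - 1) col == some 3))) =
           pvLink (pvCell sd ((k : Int) - 1) col) (pvCell sd (k : Int) col) :=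
      pvBoolShuffle (pvCell sd ((k : Int) - 1) col == some 2) (pvCell sd ((k : Int) - 1) col == some 3)
        (pvCell sd (k : Int) col == some 3) (pvCell sd (k : Int) col == some 4)
    rw [hg, Bool.true_and, hshape]
    match k with
    | 0 =>
      rw [show ((0 : Nat) : Int) - 1 = (-1 : Int) from by norm_num,
          show ((0 : Nat) : Int) = (0 : Int) from by norm_num, hwrap, if_pos rfl]
      calc pvBwdA sd col (-1) f ≤ -1 := pvBwdA_le sd col f (-1)
        _ < 0 := by norm_num
    | k + 1 =>
      have hm1 : ((k + 1 : Nat) : Int) - 1 = (k : Int) := by push_cast; ring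
      have hc : pvLink (pvCell sd (((k + 1 : Nat) : Int) - 1) col) (pvCell sd ((k + 1 : Nat) : Int) col) = true := by
        rw [hm1, show ((k + 1 : Nat) : Int) = ((k : Int) + 1) from by push_cast; ring]
        exact hchain k (by push_cast at hln; omega)
      rw [hc, if_pos rfl, hm1]
      exact ih (k : Int) (by positivity) (by push_cast at hln ⊢; omega)
        (by push_cast at hn ⊢; omega) (by simp only [Int.toNat_natCast]; omega)

-- ===== VERDICT (by name: the statements are the Claim_ definitions above) =====
theorem get_note_range_spec : Claim_unchanged_get_note_range := by
  intro sd ln col _ hpre hnd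
  obtain ⟨hv, hb, -⟩ := hpre
  simp only [pvCellC_eq] at hv hb
  simp only [D_get_note_range] at hnd
  rcases hv with h | h | h | h | h
  · simp [get_note_range, get_note_range_alt, h]
  · simp [get_note_range, get_note_range_alt, h]
  · obtain ⟨h0, hn, -⟩ := hb (Or.inl h)
    obtain ⟨k, rfl⟩ : ∃ k : Nat, ln = (k : Int) := ⟨ln.toNat, (Int.toNat_of_nonneg h0).symm⟩
    have hf := pvFwd_eq sd col (2 * sd.length + 1) (k : Int) (by positivity)
      (by simp only [Int.toNat_natCast]; omega)
    simp only [Int.toNat_natCast] at hf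
    simp [get_note_range, get_note_range_alt, h, hf, PySem.List.slice_from_natCast]
  · obtain ⟨h0, hn, -⟩ := hb (Or.inr (Or.inl h))
    obtain ⟨k, rfl⟩ : ∃ k : Nat, ln = (k : Int) := ⟨ln.toNat, (Int.toNat_of_nonneg h0).symm⟩
    have hkn : k < sd.length := by exact_mod_cast hn
    have hw : ¬ ((∀ i : Nat, i < ((k : Int)).toNat →
           pvLink (pvCell sd i col) (pvCell sd (i + 1) col) = true) ∧
        pvLink (pvCell sd (-1) col) (pvCell sd 0 col) = true) := by
      rintro ⟨hc, hwr⟩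
      simp only [Int.toNat_natCast] at hc hnd
      refine hnd ⟨Or.inl (by rw [pvRowAt_eq sd col k hkn]; exact h), h0, hn, ?_, ?_⟩
      · intro i hi
        rw [pvLinkC_eq, pvRowAt_eq sd col i (by omega), pvRowAt_eq sd col (i + 1) (by omega)]
        have := hc i hi
        push_cast
        exact this
      · rw [pvWrap_eq sd col (by omega)]
        exact hwr
    have hbw := pvBwd_eq sd col (2 * sd.length + 1) (k : Int) h0 hn
      (by simp only [Int.toNat_natCast]; omega) hw
    have hf := pvFwd_eq sd col (2 * sd.length + 1) (k : Int) (by positivity)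
      (by simp only [Int.toNat_natCast]; omega)
    simp only [Int.toNat_natCast] at hbw hf
    simp [get_note_range, get_note_range_alt, h, hbw, hf,
      PySem.List.slice_from_natCast, PySem.List.slice_to_natCast]
  · obtain ⟨h0, hn, -⟩ := hb (Or.inr (Or.inr h))
    obtain ⟨k, rfl⟩ : ∃ k : Nat, ln = (k : Int) := ⟨ln.toNat, (Int.toNat_of_nonneg h0).symm⟩
    have hkn : k < sd.length := by exact_mod_cast hn
    have hw : ¬ ((∀ i : Nat, i < ((k : Int)).toNat →
           pvLink (pvCell sd i col) (pvCell sd (i + 1) col) = true) ∧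
        pvLink (pvCell sd (-1) col) (pvCell sd 0 col) = true) := by
      rintro ⟨hc, hwr⟩
      simp only [Int.toNat_natCast] at hc hnd
      refine hnd ⟨Or.inr (by rw [pvRowAt_eq sd col k hkn]; exact h), h0, hn, ?_, ?_⟩
      · intro i hi
        rw [pvLinkC_eq, pvRowAt_eq sd col i (by omega), pvRowAt_eq sd col (i + 1) (by omega)]
        have := hc i hi
        push_cast
        exact this
      · rw [pvWrap_eq sd col (by omega)]
        exact hwr
    have hbw := pvBwd_eq sd col (2 * sd.length + 1) (k : Int) h0 hn
      (by simp only [Int.toNat_natCast]; omega) hw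
    simp only [Int.toNat_natCast] at hbw
    simp [get_note_range, get_note_range_alt, h, hbw, PySem.List.slice_to_natCast]

theorem get_note_range_changed : Claim_changed_get_note_range := by
  unfold Claim_changed_get_note_range; decide

theorem get_note_range_tight : Claim_exact_get_note_range := by
  intro sd ln col _ _ hd
  obtain ⟨hv34, h0, hn, hchain, hwrap⟩ := hd
  obtain ⟨k, rfl⟩ : ∃ k : Nat, ln = (k : Int) := ⟨ln.toNat, (Int.toNat_of_nonneg h0).symm⟩
  have hkn : k < sd.length := by exact_mod_cast hn
  simp only [Int.toNat_natCast] at hv34 hchain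
  rw [pvRowAt_eq sd col k hkn] at hv34
  rw [pvWrap_eq sd col (by omega)] at hwrap
  have hchain' : ∀ i : Nat, i < ((k : Int)).toNat →
      pvLink (pvCell sd i col) (pvCell sd (i + 1) col) = true := by
    intro i hi
    simp only [Int.toNat_natCast] at hi
    have := hchain i hi
    rw [pvLinkC_eq, pvRowAt_eq sd col i (by omega), pvRowAt_eq sd col (i + 1) (by omega)] at this
    push_cast at this
    push_cast
    exact this
  have hneg := pvBwd_neg sd col (k : Int) hchain' hwrap (2 * sd.length + 1) (k : Int)
    h0 le_rfl hn (by simp only [Int.toNat_natCast]; omega)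
  have hlead := pvLeading_le (((pvLinks sd col).take k).reverse)
  intro heq
  have h1 := congrArg Prod.fst heq
  rcases hv34 with h | h
  · simp [get_note_range, get_note_range_alt, h, PySem.List.slice_to_natCast] at h1
    rw [h1] at hneg
    simp only [List.length_reverse, List.length_take] at hlead
    omega
  · simp [get_note_range, get_note_range_alt, h, PySem.List.slice_to_natCast] at h1
    rw [h1] at hneg
    simp only [List.length_reverse, List.length_take] at hlead
    omega
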